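-- pv_equiv track=rewrite | github.com/Sayan8981/Projectx | common_lib/lib.py | to_check_variant_parent_id
-- ===== SOURCE A (Python) =====
-- def to_check_variant_parent_id(projectx_api_response,px_array,px_variant_id):
--     variant_present='False'
--     for kk in projectx_api_response:
--         if kk.get("variant_parent_id") is not None:
--             px_variant_id.append(kk.get("variant_parent_id"))
--     for id_ in px_array:
--         if id_ in px_variant_id:
--             variant_present='True'
--             break
--     return variant_present
-- ===== SOURCE B (Python) =====
-- def to_check_variant_parent_id(projectx_api_response, px_array, px_variant_id):
--     px_set = set(px_array)
--     variant_present = 'True' if any(v in px_set for v in px_variant_id) else 'False'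
--     for kk in projectx_api_response:
--         vpid = kk.get("variant_parent_id")
--         if vpid is not None:
--             px_variant_id.append(vpid)
--             if vpid in px_set:
--                 variant_present = 'True'
--     return variant_present
-- ===== Notes on version B (the rewrite author's own statement) =====
-- stated objective: alternative
-- what changed: B builds a set of px_array once and decides the answer in a single fused pass (pre-existing px_variant_id contents, then each appended parent id), instead of A's append-all pass followed by a separate membership scan of px_array against the grown list.
import Mathlib
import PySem

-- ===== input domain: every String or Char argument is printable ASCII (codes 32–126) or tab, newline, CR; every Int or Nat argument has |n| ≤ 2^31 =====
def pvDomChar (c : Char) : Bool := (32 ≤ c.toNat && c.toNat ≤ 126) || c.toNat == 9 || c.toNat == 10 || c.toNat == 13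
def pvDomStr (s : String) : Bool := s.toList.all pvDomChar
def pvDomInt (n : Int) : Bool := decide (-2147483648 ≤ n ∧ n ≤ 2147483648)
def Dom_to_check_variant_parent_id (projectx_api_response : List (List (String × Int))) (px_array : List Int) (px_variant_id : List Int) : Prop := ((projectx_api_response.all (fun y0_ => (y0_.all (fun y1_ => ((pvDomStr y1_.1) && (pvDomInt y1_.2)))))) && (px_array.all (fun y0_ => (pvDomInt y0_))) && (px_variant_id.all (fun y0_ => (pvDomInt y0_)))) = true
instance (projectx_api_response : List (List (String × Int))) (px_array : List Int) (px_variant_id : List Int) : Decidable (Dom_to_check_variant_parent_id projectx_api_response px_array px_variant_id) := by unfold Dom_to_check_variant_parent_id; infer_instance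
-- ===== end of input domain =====

-- B replaces A's append-all pass plus separate membership scan by a set of px_array and one
-- fused pass (alternative decomposition). A mutates px_variant_id (appends); B performs the
-- same mutation; the equivalence proved here is about the return value.

-- ===== PORT A =====
-- second loop of A: 'for id_ in px_array: if id_ in px_variant_id: return "True"'(break)
def pvCheckLoopA : List Int → List Int → String
  | [], _ => "False"
  | id_ :: rest, pv => if pv.contains id_ then "True" else pvCheckLoopA rest pv

def to_check_variant_parent_id (projectx_api_response : List (List (String × Int))) (px_array : List Int) (px_variant_id : List Int) : String :=
  -- first loop: append kk.get("variant_parent_id") when not None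
  let pv := projectx_api_response.foldl (fun acc kk =>
      match PySem.Dict.get? (PySem.Dict.mk kk) "variant_parent_id" with
      | some v => acc ++ [v]
      | none => acc) px_variant_id
  pvCheckLoopA px_array pv

-- ===== PORT B =====
def to_check_variant_parent_id_alt (projectx_api_response : List (List (String × Int))) (px_array : List Int) (px_variant_id : List Int) : String :=
  let pxSet : PySem.Set Int := PySem.Set.ofList px_array
  let vp0 := if px_variant_id.any (fun v => PySem.Set.contains pxSet v) then "True" else "False"
  (projectx_api_response.foldl (fun (st : List Int × String) kk =>
      match PySem.Dict.get? (PySem.Dict.mk kk) "variant_parent_id" with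
      | some vpid => (st.1 ++ [vpid], if PySem.Set.contains pxSet vpid then "True" else st.2)
      | none => st) (px_variant_id, vp0)).2

-- ===== PRECONDITION & SPEC =====
def Spec_to_check_variant_parent_id (projectx_api_response : List (List (String × Int))) (px_array : List Int) (px_variant_id : List Int) (out : String) : Prop := out = to_check_variant_parent_id_alt projectx_api_response px_array px_variant_id
instance (projectx_api_response : List (List (String × Int))) (px_array : List Int) (px_variant_id : List Int) (out : String) : Decidable (Spec_to_check_variant_parent_id projectx_api_response px_array px_variant_id out) := by unfold Spec_to_check_variant_parent_id; infer_instance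

-- ===== CLAIM (what is proved, stated in full; the proofs are below) =====
def Claim_equal_to_check_variant_parent_id : Prop := ∀ (projectx_api_response : List (List (String × Int))) (px_array : List Int) (px_variant_id : List Int), Dom_to_check_variant_parent_id projectx_api_response px_array px_variant_id → Spec_to_check_variant_parent_id projectx_api_response px_array px_variant_id (to_check_variant_parent_id projectx_api_response px_array px_variant_id)

-- ===== LEMMAS AND PROOFS =====

-- A's first loop appends exactly the present values
theorem pvFoldA_eq (resp : List (List (String × Int))) (L : List Int) :
    resp.foldl (fun acc kk =>
      match PySem.Dict.get? (PySem.Dict.mk kk) "variant_parent_id" with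
      | some v => acc ++ [v]
      | none => acc) L
    = L ++ resp.filterMap (fun kk => PySem.Dict.get? (PySem.Dict.mk kk) "variant_parent_id") := by
  induction resp generalizing L with
  | nil => simp
  | cons kk rest ih =>
    simp only [List.foldl_cons, List.filterMap_cons]
    cases h : PySem.Dict.get? (PySem.Dict.mk kk) "variant_parent_id" with
    | none => simp [ih]
    | some v => simp [ih]

-- A's second loop as an if over any
theorem pvCheckLoopA_eq (xs pv : List Int) :
    pvCheckLoopA xs pv = if xs.any (fun x => pv.contains x) then "True" else "False" := by
  induction xs with
  | nil => simp [pvCheckLoopA]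
  | cons x rest ih =>
    simp only [pvCheckLoopA, List.any_cons, ih]
    by_cases h : x ∈ pv <;> simp [h]

-- B's fused loop: second component
theorem pvFoldB_eq (pxSet : PySem.Set Int) (resp : List (List (String × Int))) (L : List Int) (s : String) :
    (resp.foldl (fun (st : List Int × String) kk =>
      match PySem.Dict.get? (PySem.Dict.mk kk) "variant_parent_id" with
      | some vpid => (st.1 ++ [vpid], if PySem.Set.contains pxSet vpid then "True" else st.2)
      | none => st) (L, s)).2
    = if (resp.filterMap (fun kk => PySem.Dict.get? (PySem.Dict.mk kk) "variant_parent_id")).any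
          (fun v => PySem.Set.contains pxSet v) then "True" else s := by
  induction resp generalizing L s with
  | nil => simp
  | cons kk rest ih =>
    cases hkk : PySem.Dict.get? (PySem.Dict.mk kk) "variant_parent_id" with
    | none =>
      simp only [List.foldl_cons, List.filterMap_cons, hkk]
      exact ih L s
    | some v =>
      simp only [List.foldl_cons, List.filterMap_cons, hkk, ih, List.any_cons]
      by_cases hv : v ∈ pxSet <;>
        by_cases hr : ∃ w ∈ rest.filterMap (fun kk => PySem.Dict.get? (PySem.Dict.mk kk) "variant_parent_id"), w ∈ pxSet <;>
          simp [hv, hr]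

theorem pvMemSwap (px_array L : List Int) :
    (px_array.any (fun x => L.contains x))
      = (L.any (fun v => PySem.Set.contains (PySem.Set.ofList px_array) v)) := by
  rw [Bool.eq_iff_iff]
  simp only [List.any_eq_true]
  constructor
  · rintro ⟨x, hx, hL⟩
    refine ⟨x, by simpa using hL, ?_⟩
    simp [PySem.Set.mem_ofList]
    exact hx
  · rintro ⟨v, hv, hs⟩
    refine ⟨v, ?_, by simpa using hv⟩
    simpa [PySem.Set.mem_ofList] using hs

theorem pvIfOr (a b : Bool) :
    (if (a || b) = true then "True" else "False")
      = (if b = true then "True" else if a = true then "True" else "False") := by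
  cases a <;> cases b <;> rfl

-- ===== VERDICT (by name: the statement is the Claim_ definition above) =====
theorem to_check_variant_parent_id_spec : Claim_equal_to_check_variant_parent_id := by
  intro resp px_array px_variant_id _
  unfold Spec_to_check_variant_parent_id to_check_variant_parent_id to_check_variant_parent_id_alt
  simp only [pvFoldA_eq, pvCheckLoopA_eq, pvFoldB_eq, pvMemSwap, List.any_append]
  exact pvIfOr _ _
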